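-- pv_equiv track=rewrite | github.com/mhee4321/python_algorithm | codingTest/ggg/goodString.py | solution
-- ===== SOURCE A (Python) =====
-- from itertools import combinations
--
-- def solution(s):
--     count = 0
--     s_list = list(s)
--
--     # 개수가 하나일때
--     case1 = []
--     for i in s_list:
--         if i not in case1:
--             case1.append(i)
--             count += 1
--     # 개수가 두개이상일 때
--     for z in range(2, count+1):
--         p_list = list(map(''.join, combinations(s_list, z)))
--         for i in p_list:
--             case2 = []
--             for j in i:
--                 if len(case2) == 0:
--                     case2.append(j)
--                 if j not in case2:
--                     case2.append(j)
--                     count += 1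
--
--     return count // 2
-- ===== SOURCE B (Python) =====
-- def comb(n, k):
--     # C(n, k) by the exact multiplicative recurrence (0 for k > n)
--     r = 1
--     for i in range(k):
--         r = r * (n - i) // (i + 1)
--     return r
--
-- def solution(s):
--     n = len(s)
--     counts = [s.count(c) for c in sorted(set(s))]
--     d = len(counts)
--     total = d
--     for z in range(2, d + 1):
--         # sum over combos of size z of (distinct-1):
--         # each char c appears in comb(n,z)-comb(n-count_c,z) combos; subtract 1 per combo
--         total += sum(comb(n, z) - comb(n - f, z) for f in counts) - comb(n, z)
--     return total // 2
-- ===== Notes on version B (the rewrite author's own statement) =====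
-- stated objective: faster
-- what changed: A enumerates every combination of size z (exponential in the number of distinct chars) and rescans each combo to count its distinct characters; B never enumerates: it takes counts per distinct char via sorted(set(s)) and s.count, and computes each per-z contribution in closed form as sum_c (C(n,z)-C(n-count_c,z)) - C(n,z), with binomials from the exact multiplicative recurrence.
import Mathlib
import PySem

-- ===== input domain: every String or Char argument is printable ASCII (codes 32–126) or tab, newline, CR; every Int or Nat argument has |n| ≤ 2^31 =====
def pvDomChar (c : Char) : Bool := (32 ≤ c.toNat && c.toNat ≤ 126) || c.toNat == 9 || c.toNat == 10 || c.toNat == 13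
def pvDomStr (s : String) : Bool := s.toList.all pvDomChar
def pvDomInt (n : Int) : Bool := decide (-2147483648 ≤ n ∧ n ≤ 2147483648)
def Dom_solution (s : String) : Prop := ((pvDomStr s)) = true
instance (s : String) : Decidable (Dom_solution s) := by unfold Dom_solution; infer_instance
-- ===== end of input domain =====

-- B replaces A's exponential enumeration of combinations by a closed-form binomial count
-- (each char c lies in C(n,z)-C(n-freq_c,z) of the C(n,z) combos of size z): asymptotically faster.

-- ===== PORT A =====
-- ''.join makes a string of the combo's chars; iterating that string is iterating the char list,
-- so combos are kept as List Char (same elements, same order).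
def solution (s : String) : Int :=
  let s_list := s.toList
  -- case1 loop: `if i not in case1: case1.append(i); count += 1`
  let p := s_list.foldl
    (fun (st : List Char × Int) i => if i ∈ st.1 then st else (st.1 ++ [i], st.2 + 1))
    ([], 0)
  let count := p.2
  let count := (PySem.List.pyRange 2 (count + 1)).foldl (fun cnt z =>
      let p_list := PySem.List.combinations s_list z.toNat
      p_list.foldl (fun cnt i =>
        (i.foldl (fun (st : List Char × Int) j =>
            let case2 := if st.1.length = 0 then st.1 ++ [j] else st.1
            if j ∈ case2 then (case2, st.2) else (case2 ++ [j], st.2 + 1))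
          ([], cnt)).2) cnt) count
  PySem.Int.floordiv count 2

-- ===== PORT B =====
-- math-free comb helper of Source B: r = r * (n - i) // (i + 1); exact for the n,k >= 0 it is called on
def pycomb (n k : Int) : Int :=
  (PySem.List.pyRange 0 k).foldl (fun r i => PySem.Int.floordiv (r * (n - i)) (i + 1)) 1

-- sorted(set(s)) -> sorted distinct chars (order-independent use); s.count(c) with the 1-char string c
def solution_alt (s : String) : Int :=
  let n : Int := PySem.Str.len s
  let counts := (PySem.List.sorted (PySem.Set.ofList s.toList) (fun x => x) false).map
      (fun c => (PySem.Str.count s (String.ofList [c]) : Int))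
  let d : Int := counts.length
  let total := d
  let total := (PySem.List.pyRange 2 (d + 1)).foldl (fun tot z =>
      tot + ((counts.map (fun f => pycomb n z - pycomb (n - f) z)).sum - pycomb n z)) total
  PySem.Int.floordiv total 2

-- ===== PRECONDITION & SPEC =====
def Spec_solution (s : String) (out : Int) : Prop := out = solution_alt s
instance (s : String) (out : Int) : Decidable (Spec_solution s out) := by unfold Spec_solution; infer_instance

-- ===== CLAIM (what is proved, stated in full; the proofs are below) =====
def Claim_equal_solution : Prop := ∀ (s : String), Dom_solution s → Spec_solution s (solution s)

-- ===== LEMMAS AND PROOFS =====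

-- the first-occurrence dedup step both programs' membership loops perform
def pvDstep (a : List Char) (i : Char) : List Char := if i ∈ a then a else a ++ [i]

theorem pvDstep_eq_add (a : List Char) (i : Char) : pvDstep a i = PySem.Set.add a i := by
  simp [pvDstep, PySem.Set.add, PySem.Set.contains]

theorem pvDedup_eq_ofList (l : List Char) :
    l.foldl pvDstep [] = PySem.Set.ofList l := by
  rw [PySem.Set.ofList_eq_foldl]
  exact PySem.List.foldl_congr_mem l _ _ [] (fun acc x _ => pvDstep_eq_add acc x)

-- A's case1 loop: the pair fold is (dedup, count = old + new distinct)
theorem pvCase1_loop (l : List Char) : ∀ (a : List Char) (c : Int),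
    l.foldl (fun (st : List Char × Int) i => if i ∈ st.1 then st else (st.1 ++ [i], st.2 + 1)) (a, c)
    = (l.foldl pvDstep a, c + ((l.foldl pvDstep a).length : Int) - (a.length : Int)) := by
  induction l with
  | nil => simp
  | cons x l ih =>
    intro a c
    rw [List.foldl_cons, List.foldl_cons]
    by_cases hx : x ∈ a
    · rw [if_pos hx, show pvDstep a x = a from if_pos hx]
      exact ih a c
    · rw [if_neg hx, show pvDstep a x = a ++ [x] from if_neg hx,
        ih (a ++ [x]) (c + 1)]
      refine Prod.ext rfl ?_
      simp only [List.length_append, List.length_cons, List.length_nil]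
      push_cast
      ring

-- A's case2 loop on a NONEMPTY accumulator: the length-0 guard is dead
theorem pvCase2_loop (l : List Char) : ∀ (a : List Char) (c : Int), a ≠ [] →
    l.foldl (fun (st : List Char × Int) j =>
        let case2 := if st.1.length = 0 then st.1 ++ [j] else st.1
        if j ∈ case2 then (case2, st.2) else (case2 ++ [j], st.2 + 1)) (a, c)
    = (l.foldl pvDstep a, c + ((l.foldl pvDstep a).length : Int) - (a.length : Int)) := by
  induction l with
  | nil => simp
  | cons x l ih =>
    intro a c ha
    have hlen : ¬ a.length = 0 := by simpa [List.length_eq_zero_iff] using ha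
    rw [List.foldl_cons, List.foldl_cons]
    by_cases hx : x ∈ a
    · simp only [hlen, if_false, hx, if_true]
      rw [show pvDstep a x = a from if_pos hx]
      exact ih a c ha
    · simp only [hlen, if_false, hx]
      rw [show pvDstep a x = a ++ [x] from if_neg hx,
        ih (a ++ [x]) (c + 1) (by simp)]
      refine Prod.ext rfl ?_
      simp only [List.length_append, List.length_cons, List.length_nil]
      push_cast
      ring

-- A's inner loop on a nonempty combo adds (#distinct chars - 1)
theorem pvInner_eq (t : List Char) (ht : t ≠ []) (c : Int) :
    (t.foldl (fun (st : List Char × Int) j =>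
        let case2 := if st.1.length = 0 then st.1 ++ [j] else st.1
        if j ∈ case2 then (case2, st.2) else (case2 ++ [j], st.2 + 1)) ([], c)).2
    = c + (((t.foldl pvDstep []).length : Int) - 1) := by
  match t with
  | [] => exact absurd rfl ht
  | x :: r =>
    rw [List.foldl_cons]
    simp only [List.length_nil, List.nil_append, List.mem_singleton, if_true]
    rw [pvCase2_loop r [x] c (by simp)]
    have : r.foldl pvDstep [x] = (x :: r).foldl pvDstep [] := by
      simp [pvDstep]
    rw [this]
    simp only [List.length_cons, List.length_nil]
    push_cast
    ring

theorem pvCombs_length (l : List Char) : ∀ z : Nat,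
    (PySem.List.combinations l z).length = l.length.choose z := by
  induction l with
  | nil =>
    intro z
    cases z with
    | zero => simp [PySem.List.combinations_zero]
    | succ z => simp [PySem.List.combinations_nil_succ]
  | cons x xs ih =>
    intro z
    cases z with
    | zero => simp [PySem.List.combinations_zero]
    | succ z =>
      rw [PySem.List.combinations_cons_succ]
      simp only [List.length_append, List.length_map, List.length_cons]
      rw [ih z, ih (z + 1), Nat.choose_succ_succ]

-- combos of size z avoiding char c = combos of the list with c's occurrences removed
theorem pvCombs_avoid (c : Char) (l : List Char) : ∀ z : Nat,
    (PySem.List.combinations l z).countP (fun t => !decide (c ∈ t))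
    = (l.length - l.count c).choose z := by
  induction l with
  | nil =>
    intro z
    cases z with
    | zero => simp [PySem.List.combinations_zero]
    | succ z => simp [PySem.List.combinations_nil_succ]
  | cons x xs ih =>
    intro z
    cases z with
    | zero => simp [PySem.List.combinations_zero]
    | succ z =>
      rw [PySem.List.combinations_cons_succ, List.countP_append, List.countP_map]
      have hcnt : xs.count c ≤ xs.length := List.count_le_length
      by_cases hx : x = c
      · subst hx
        have h1 : ((PySem.List.combinations xs z).countP
            ((fun t => !decide (x ∈ t)) ∘ (fun t => x :: t))) = 0 := by
          apply List.countP_eq_zero.mpr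
          intro t _
          simp
        rw [h1, ih (z + 1)]
        simp [List.count_cons_self]
      · have h1 : ∀ t : List Char, ((fun t => !decide (c ∈ t)) ∘ (fun t => x :: t)) t
            = (fun t => !decide (c ∈ t)) t := by
          intro t
          simp [List.mem_cons, Ne.symm hx]
        rw [List.countP_congr (fun t _ => (by rw [h1 t] : _)), ih z, ih (z + 1)]
        have hc : (x :: xs).count c = xs.count c := List.count_cons_of_ne hx
        rw [hc]
        simp only [List.length_cons]
        have : xs.length + 1 - xs.count c = (xs.length - xs.count c) + 1 := by omega
        rw [this, Nat.choose_succ_succ]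

theorem pvCombs_contain (c : Char) (l : List Char) (z : Nat) :
    ((PySem.List.combinations l z).countP (fun t => decide (c ∈ t)) : Int)
    = (l.length.choose z : Int) - ((l.length - l.count c).choose z : Int) := by
  have hsplit := List.length_eq_countP_add_countP (p := fun t => decide (c ∈ t))
      (l := PySem.List.combinations l z)
  have havoid := pvCombs_avoid c l z
  have hnot : (PySem.List.combinations l z).countP
      (fun a => !decide (c ∈ a)) = (l.length - l.count c).choose z := havoid
  have hlen := pvCombs_length l z
  have hb : (PySem.List.combinations l z).countP (fun a => decide ¬(decide (c ∈ a) = true))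
      = (PySem.List.combinations l z).countP (fun a => !decide (c ∈ a)) := by
    apply List.countP_congr
    intro t _
    simp
  omega

-- double counting: sum over combos of #distinct-in-combo = sum over distinct chars of #combos containing it
theorem pvDouble_count (D : List Char) (L : List (List Char)) :
    (L.map (fun t => ((D.countP (fun c => decide (c ∈ t))) : Int))).sum
    = (D.map (fun c => ((L.countP (fun t => decide (c ∈ t))) : Int))).sum := by
  induction D with
  | nil => simp
  | cons c D ih =>
    have h1 : (L.map (fun t => (((c :: D).countP (fun c => decide (c ∈ t))) : Int))).sum
        = (L.map (fun t => ((D.countP (fun c => decide (c ∈ t))) : Int)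
            + (if c ∈ t then (1 : Int) else 0))).sum := by
      apply congrArg
      apply List.map_eq_map_iff.mpr
      intro t _
      rw [List.countP_cons]
      push_cast
      by_cases hc : c ∈ t <;> simp [hc]
    rw [h1, PySem.List.sum_map_add_int, PySem.List.sum_map_ite_one_zero' (fun t => c ∈ t) L, ih]
    simp only [List.map_cons, List.sum_cons]
    ring

-- #distinct chars of t (t with all chars from l) counted against l's dedup list
theorem pvDistinct_count (l t : List Char) (h : ∀ x ∈ t, x ∈ l) :
    (t.foldl pvDstep []).length = (l.foldl pvDstep []).countP (fun c => decide (c ∈ t)) := by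
  rw [pvDedup_eq_ofList, pvDedup_eq_ofList, List.countP_eq_length_filter]
  apply List.Perm.length_eq
  apply (List.perm_ext_iff_of_nodup (PySem.Set.nodup_ofList t)
    ((PySem.Set.nodup_ofList l).filter _)).mpr
  intro a
  rw [PySem.Set.mem_ofList, List.mem_filter, PySem.Set.mem_ofList]
  constructor
  · intro hat
    exact ⟨h a hat, by simpa using hat⟩
  · intro ⟨_, hat⟩
    simpa using hat

-- Source B's comb loop computes the binomial coefficient
theorem pvPycomb_eq_choose (n : Nat) : ∀ k : Nat, pycomb (n : Int) (k : Int) = (n.choose k : Int) := by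
  intro k
  induction k with
  | zero => simp [pycomb]
  | succ k ih =>
    have hrange : PySem.List.pyRange 0 ((k : Int) + 1) = PySem.List.pyRange 0 (k : Int) ++ [(k : Int)] :=
      PySem.List.pyRange_one_succ_right (by positivity)
    unfold pycomb at ih ⊢
    push_cast
    rw [hrange, List.foldl_append, ih]
    simp only [List.foldl_cons, List.foldl_nil]
    by_cases hk : k < n
    · have h1 : (n : Int) - (k : Int) = ((n - k : Nat) : Int) := by push_cast [Nat.cast_sub hk.le]; ring
      rw [h1]
      have h2 : ((n.choose k : Nat) : Int) * ((n - k : Nat) : Int) = (((n.choose k * (n - k)) : Nat) : Int) := by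
        push_cast; ring
      have h3 : ((k : Int) + 1) = (((k + 1 : Nat)) : Int) := by push_cast; ring
      rw [h2, h3, PySem.Int.floordiv_natCast]
      have h4 : n.choose k * (n - k) = n.choose (k + 1) * (k + 1) := (Nat.choose_succ_right_eq n k).symm
      rw [h4, Nat.mul_div_cancel _ (Nat.succ_pos k)]
    · have h0 : ((n.choose k : Nat) : Int) * ((n : Int) - (k : Int)) = 0 := by
        rcases Nat.lt_or_ge n k with hnk | hnk
        · rw [Nat.choose_eq_zero_of_lt hnk]; simp
        · have : n = k := le_antisymm (not_lt.mp hk) hnk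
          subst this; simp
      rw [h0, Nat.choose_eq_zero_of_lt (by omega),
        PySem.Int.floordiv_eq_ediv_of_pos (by positivity)]
      simp

-- the per-z term of A's outer loop equals B's closed form
theorem pvPerZ (l : List Char) (zn : Nat) (hz : 1 ≤ zn) (cnt : Int) :
    (PySem.List.combinations l zn).foldl (fun cnt i =>
        (i.foldl (fun (st : List Char × Int) j =>
            let case2 := if st.1.length = 0 then st.1 ++ [j] else st.1
            if j ∈ case2 then (case2, st.2) else (case2 ++ [j], st.2 + 1)) ([], cnt)).2) cnt
    = cnt + (((l.foldl pvDstep []).map (fun c =>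
          (l.length.choose zn : Int) - ((l.length - l.count c).choose zn : Int))).sum
        - (l.length.choose zn : Int)) := by
  have h1 : (PySem.List.combinations l zn).foldl (fun cnt i =>
        (i.foldl (fun (st : List Char × Int) j =>
            let case2 := if st.1.length = 0 then st.1 ++ [j] else st.1
            if j ∈ case2 then (case2, st.2) else (case2 ++ [j], st.2 + 1)) ([], cnt)).2) cnt
      = (PySem.List.combinations l zn).foldl
          (fun acc t => acc + (((t.foldl pvDstep []).length : Int) - 1)) cnt := by
    apply PySem.List.foldl_congr_mem
    intro acc t htL
    have hlen : t.length = zn := PySem.List.length_of_mem_combinations htL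
    have hne : t ≠ [] := by
      intro hnil
      rw [hnil] at hlen
      simp at hlen
      omega
    exact pvInner_eq t hne acc
  rw [h1, PySem.List.foldl_add]
  congr 1
  have h2 : (PySem.List.combinations l zn).map (fun t => ((t.foldl pvDstep []).length : Int) - 1)
      = (PySem.List.combinations l zn).map (fun t =>
          (((l.foldl pvDstep []).countP (fun c => decide (c ∈ t))) : Int) + (-1)) := by
    apply List.map_eq_map_iff.mpr
    intro t htL
    have hsub : ∀ x ∈ t, x ∈ l :=
      fun x hx => List.Sublist.mem hx (PySem.List.sublist_of_mem_combinations htL)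
    rw [pvDistinct_count l t hsub]
    ring
  rw [h2, PySem.List.sum_map_add_int, PySem.List.sum_map_const_int,
    pvDouble_count (l.foldl pvDstep []) (PySem.List.combinations l zn)]
  have h3 : (l.foldl pvDstep []).map
        (fun c => (((PySem.List.combinations l zn).countP (fun t => decide (c ∈ t))) : Int))
      = (l.foldl pvDstep []).map (fun c =>
          (l.length.choose zn : Int) - ((l.length - l.count c).choose zn : Int)) := by
    apply List.map_eq_map_iff.mpr
    intro c _
    exact pvCombs_contain c l zn
  rw [h3, pvCombs_length l zn]
  ring

-- s.count(c) for a single character is the character count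
theorem pvCountGo (c : Char) : ∀ (fuel : Nat) (l : List Char) (acc : Nat), l.length ≤ fuel →
    PySem.Chars.count.go [c] fuel l acc = acc + List.count c l := by
  intro fuel
  induction fuel with
  | zero =>
    intro l acc h
    cases l with
    | nil => simp [PySem.Chars.count.go]
    | cons x t => simp at h
  | succ fuel ih =>
    intro l acc h
    cases l with
    | nil => simp [PySem.Chars.count.go]
    | cons x t =>
      rw [PySem.Chars.count.go]
      simp only [List.isPrefixOf, Bool.and_true, List.length_cons] at *
      by_cases hx : c = x
      · subst hx
        simp only [BEq.rfl, if_true, List.length_nil, List.drop_succ_cons, List.drop_zero]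
        rw [ih t (acc + 1) (by omega), List.count_cons_self]
        omega
      · have hbeq : (c == x) = false := beq_eq_false_iff_ne.mpr hx
        simp only [hbeq, Bool.false_eq_true, if_false]
        rw [List.count_cons_of_ne (Ne.symm hx)]
        exact ih t acc (by omega)

theorem pvStrCount_singleton (s : String) (c : Char) :
    PySem.Str.count s (String.ofList [c]) = List.count c s.toList := by
  rw [PySem.Str.count_eq]
  have h : (String.ofList [c]).toList = [c] := by simp
  rw [h, PySem.Chars.count]
  simp only [List.isEmpty_cons, Bool.false_eq_true, if_false]
  simpa using pvCountGo c s.toList.length s.toList 0 le_rfl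

-- ===== VERDICT (by name: the statement is the Claim_ definition above) =====
theorem solution_spec : Claim_equal_solution := by
  intro s _
  unfold Spec_solution solution solution_alt
  simp only []
  rw [pvCase1_loop s.toList [] 0]
  simp only [List.length_nil, Nat.cast_zero, sub_zero, zero_add]
  rw [pvDedup_eq_ofList s.toList]
  have hcounts : ((PySem.List.sorted (PySem.Set.ofList s.toList) (fun x => x) false).map
        (fun c => (PySem.Str.count s (String.ofList [c]) : Int)))
      = (PySem.List.sorted (PySem.Set.ofList s.toList) (fun x => x) false).map
        (fun c => (List.count c s.toList : Int)) := by
    apply List.map_eq_map_iff.mpr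
    intro c _
    rw [pvStrCount_singleton]
  rw [hcounts]
  have hperm := PySem.List.sorted_perm (PySem.Set.ofList s.toList) (fun x => x) false
  simp only [List.length_map, hperm.length_eq, PySem.Str.len_eq]
  congr 1
  apply PySem.List.foldl_congr_mem
  intro acc z hz
  have hzr := PySem.List.mem_pyRange_one.mp hz
  have hz2 : 2 ≤ z := hzr.1
  have hzc : ((z.toNat : Nat) : Int) = z := Int.toNat_of_nonneg (by omega)
  have hA := pvPerZ s.toList z.toNat (by omega) acc
  rw [pvDedup_eq_ofList s.toList] at hA
  rw [hA]
  congr 1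
  rw [← hzc]
  simp only [Int.toNat_natCast]
  rw [pvPycomb_eq_choose s.toList.length z.toNat, List.map_map]
  have hsum := List.Perm.sum_eq (List.Perm.map
      ((fun f => ((s.toList.length.choose z.toNat : Nat) : Int) - pycomb ((s.toList.length : Int) - f) ((z.toNat : Nat) : Int))
        ∘ (fun c => (List.count c s.toList : Int))) hperm)
  rw [hsum]
  congr 1
  congr 1
  apply List.map_eq_map_iff.mpr
  intro c hc
  simp only [Function.comp_apply]
  have hcl : List.count c s.toList ≤ s.toList.length := List.count_le_length
  rw [show ((s.toList.length : Int) - ((List.count c s.toList : Nat) : Int))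
        = (((s.toList.length - List.count c s.toList : Nat)) : Int) from by
      push_cast [Nat.cast_sub hcl]; ring,
    pvPycomb_eq_choose (s.toList.length - List.count c s.toList) z.toNat]
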